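-- pv_equiv track=rewrite | github.com/VedantDeore/AlgorithmPractice | Python/Daily/March2026/4248-count-commas-in-range-ii/count-commas-in-range-ii.py | countCommas
-- ===== SOURCE A (Python) =====
-- def countCommas(n: int) -> int:
--     if n<=999:
--         return 0
--
--     div = 1000
--     ans=0
--     while n>= div:
--         ans += (n - div +1)
--         div = div*1000
--
--
--     return ans
-- ===== SOURCE B (Python) =====
-- def countCommas(n: int) -> int:
--     # closed form: K powers of 1000 are <= n; sum_{k=1..K} (n - 1000**k + 1)
--     if n <= 999:
--         return 0
--     K = (len(str(n)) - 1) // 3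
--     return K * (n + 1) - (1000 ** (K + 1) - 1000) // 999
-- ===== Notes on version B (the rewrite author's own statement) =====
-- stated objective: simpler
-- what changed: Replaces the while loop over powers of 1000 by a closed form: K = (len(str(n))-1)//3 and the geometric-sum formula K*(n+1) - (1000**(K+1)-1000)//999.
import Mathlib
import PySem

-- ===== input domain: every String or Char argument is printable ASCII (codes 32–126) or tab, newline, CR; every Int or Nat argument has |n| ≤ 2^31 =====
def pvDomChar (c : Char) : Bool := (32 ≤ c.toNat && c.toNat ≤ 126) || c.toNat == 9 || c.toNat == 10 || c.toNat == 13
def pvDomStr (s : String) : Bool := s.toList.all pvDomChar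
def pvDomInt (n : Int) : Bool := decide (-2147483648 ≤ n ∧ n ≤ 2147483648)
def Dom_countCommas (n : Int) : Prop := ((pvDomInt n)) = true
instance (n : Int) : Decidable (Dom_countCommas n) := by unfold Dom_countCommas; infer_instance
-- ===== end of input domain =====

-- B replaces A's while loop by the closed form K*(n+1) - (1000^(K+1)-1000)//999 with K = (len(str(n))-1)//3 (objective: simpler).

-- ===== PORT A =====
-- A's while loop: div starts at 1000 and is multiplied by 1000 each pass.
-- The '0 < div' conjunct is a totality guard only: div is always ≥ 1000 on every call reached from countCommas.
def countLoop (n div ans : Int) : Int :=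
  if h : 0 < div ∧ div ≤ n then
    countLoop n (div * 1000) (ans + (n - div + 1))
  else ans
termination_by (n + 1 - div).toNat
decreasing_by
  have _hstep : div + 999 ≤ div * 1000 := by nlinarith [h.1]
  omega

def countCommas (n : Int) : Int :=
  if n ≤ 999 then 0
  else countLoop n 1000 0

-- ===== PORT B =====
-- K = (len(str(n)) - 1) // 3
def commasK (n : Int) : Int :=
  PySem.Int.floordiv (PySem.Str.len (PySem.Int.toStr n) - 1) 3

def countCommas_alt (n : Int) : Int :=
  if n ≤ 999 then 0
  else commasK n * (n + 1) - PySem.Int.floordiv (1000 ^ (commasK n + 1).toNat - 1000) 999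

-- ===== PRECONDITION & SPEC =====
def Spec_countCommas (n : Int) (out : Int) : Prop := out = countCommas_alt n
instance (n : Int) (out : Int) : Decidable (Spec_countCommas n out) := by unfold Spec_countCommas; infer_instance

-- ===== CLAIM (what is proved, stated in full; the proofs are below) =====
def Claim_equal_countCommas : Prop := ∀ (n : Int), Dom_countCommas n → Spec_countCommas n (countCommas n)

-- ===== LEMMAS AND PROOFS =====

-- lower bound on the length produced by Nat.toDigitsCore
lemma toDigitsCore_length_lower (b : ℕ) (hb : 2 ≤ b) :
    ∀ (f n k : ℕ) (l : List Char), b ^ k ≤ n → n < b ^ f →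
      l.length + k + 1 ≤ (Nat.toDigitsCore b f n l).length := by
  intro f
  induction f with
  | zero =>
    intro n k l hk hf
    exfalso
    have : 1 ≤ b ^ k := Nat.one_le_pow _ _ (by omega)
    simp at hf; omega
  | succ f ih =>
    intro n k l hk hf
    rw [Nat.toDigitsCore]
    by_cases hnb : n / b = 0
    · have hnlt : n < b := by
        by_contra h
        have : 1 ≤ n / b := (Nat.one_le_div_iff (by omega)).mpr (by omega)
        omega
      have hk0 : k = 0 := by
        by_contra hk0
        have : b ≤ b ^ k := Nat.le_self_pow hk0 b
        omega
      simp [hnb, hk0]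
    · simp only [hnb, if_false]
      have hdiv : b ^ (k - 1) ≤ n / b := by
        rcases Nat.eq_zero_or_pos k with rfl | hkpos
        · simpa using Nat.one_le_iff_ne_zero.mpr hnb
        · rw [Nat.le_div_iff_mul_le (by omega : 0 < b), ← pow_succ]
          have : k - 1 + 1 = k := by omega
          rw [this]; exact hk
      have hflt : n / b < b ^ f := by
        rw [Nat.div_lt_iff_lt_mul (by omega : 0 < b), ← pow_succ]
        exact hf
      have := ih (n / b) (k - 1) (Nat.digitChar (n % b) :: l) hdiv hflt
      simp only [List.length_cons] at this
      omega

lemma toDigits_length_lower (n k : ℕ) (hk : 10 ^ k ≤ n) :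
    k + 1 ≤ (Nat.toDigits 10 n).length := by
  have hf : n < 10 ^ (n + 1) :=
    lt_of_lt_of_le (Nat.lt_pow_self (by omega)) (Nat.pow_le_pow_right (by omega) (by omega))
  simpa using toDigitsCore_length_lower 10 (by omega) (n + 1) n k [] hk hf

-- digit length of str(n) for positive n, both bounds
lemma strLen_bounds (n : Int) (lo hi : ℕ) (h1 : (10:Int) ^ lo ≤ n) (h2 : n < (10:Int) ^ hi)
    (_hlo : 0 < lo) :
    (lo + 1 : Int) ≤ PySem.Str.len (PySem.Int.toStr n) ∧
      PySem.Str.len (PySem.Int.toStr n) ≤ (hi : Int) := by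
  have hn0 : 0 < n := lt_of_lt_of_le (by positivity) h1
  rw [PySem.Str.len_eq, PySem.Int.toList_toStr]
  unfold PySem.Int.toChars
  rw [if_neg (by omega)]
  have hlo' : 10 ^ lo ≤ n.toNat := by
    zify [Int.toNat_of_nonneg hn0.le]
    omega
  have hhi' : n.toNat < 10 ^ hi := by
    have := h2
    zify [Int.toNat_of_nonneg hn0.le] at *
    omega
  have hhipos : 0 < hi := by
    by_contra h
    have : hi = 0 := by omega
    subst this; simp at hhi'; omega
  constructor
  · exact_mod_cast toDigits_length_lower n.toNat lo hlo'
  · exact_mod_cast Nat.toDigits_length 10 n.toNat hi hhipos hhi'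

lemma commasK_eq (n : Int) (K : ℕ) (h1 : (10:Int) ^ (3 * K) ≤ n) (h2 : n < (10:Int) ^ (3 * K + 3))
    (hK : 0 < K) : commasK n = (K : Int) := by
  obtain ⟨hlo, hhi⟩ := strLen_bounds n (3 * K) (3 * K + 3) h1 h2 (by omega)
  unfold commasK
  rw [PySem.Int.floordiv_eq_iff_of_pos (by omega)]
  push_cast at hlo hhi ⊢
  omega

-- ===== VERDICT (by name: the statement is the Claim_ definition above) =====
theorem countCommas_spec : Claim_equal_countCommas := by
  unfold Claim_equal_countCommas Spec_countCommas
  intro n hdom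
  have hdom' : n ≤ 2147483648 := by
    simp only [Dom_countCommas, pvDomInt, decide_eq_true_eq] at hdom
    exact hdom.2
  by_cases h0 : n ≤ 999
  · simp [countCommas, countCommas_alt, h0]
  · rw [countCommas, countCommas_alt, if_neg h0, if_neg h0]
    rcases lt_or_ge n 1000000 with h1 | h1
    · have hK : commasK n = 1 := commasK_eq n 1 (by push_cast; omega) (by push_cast; omega) one_pos
      rw [countLoop, dif_pos (by omega), countLoop, dif_neg (by omega), hK]
      rw [show PySem.Int.floordiv (1000 ^ ((1:Int) + 1).toNat - 1000) 999 = 1000 from by decide]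
      omega
    · rcases lt_or_ge n 1000000000 with h2 | h2
      · have hK : commasK n = 2 := commasK_eq n 2 (by push_cast; omega) (by push_cast; omega) (by omega)
        rw [countLoop, dif_pos (by omega), countLoop, dif_pos (by omega),
          countLoop, dif_neg (by omega), hK]
        rw [show PySem.Int.floordiv (1000 ^ ((2:Int) + 1).toNat - 1000) 999 = 1001000 from by decide]
        omega
      · have hK : commasK n = 3 := commasK_eq n 3 (by push_cast; omega) (by push_cast; omega) (by omega)
        rw [countLoop, dif_pos (by omega), countLoop, dif_pos (by omega),
          countLoop, dif_pos (by omega), countLoop, dif_neg (by omega), hK]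
        rw [show PySem.Int.floordiv (1000 ^ ((3:Int) + 1).toNat - 1000) 999 = 1001001000 from by decide]
        omega
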